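-- pv_equiv track=rewrite | github.com/JefeThePug/Advent_of_Code_2022 | day14/day14b.py | build_rocks
-- ===== SOURCE A (Python) =====
-- def build_rocks(grid:list, path:list, offset:int) -> list:
--     for part in range(len(path)-1):
--         x1, y1 = map(int,path[part].split(","))
--         x2, y2 = map(int,path[part+1].split(","))
--         x1 -= offset
--         x2 -= offset
--
--         if x1 == x2: #horizontal line
--             for i in range(min(y1,y2),max(y1,y2)+1):
--                 grid[i][x1] = "#"
--         else:  #y1 == y2 vertical line
--             for i in range(min(x1,x2),max(x1,x2)+1):
--                 grid[y1][i] = "#"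
--     return grid
-- ===== SOURCE B (Python) =====
-- def build_rocks(grid: list, path: list, offset: int) -> list:
--     # Parse every corner once, then mark each segment with one unified
--     # direction-vector walk instead of two orientation-specific range loops.
--     # Mutates grid in place, like the original.
--     if len(path) < 2:
--         return grid
--     pts = [tuple(map(int, p.split(","))) for p in path]
--     for (x1, y1), (x2, y2) in zip(pts, pts[1:]):
--         x1 -= offset
--         x2 -= offset
--         if x1 != x2 and y1 != y2:
--             raise ValueError("diagonal segment")
--         sx = (x2 > x1) - (x2 < x1)
--         sy = (y2 > y1) - (y2 < y1)
--         cx, cy = x1, y1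
--         for _ in range(max(abs(x2 - x1), abs(y2 - y1)) + 1):
--             grid[cy][cx] = "#"
--             cx += sx
--             cy += sy
--     return grid
-- ===== Notes on version B (the rewrite author's own statement) =====
-- stated objective: alternative
-- what changed: B parses all corner points once up front and replaces A's two orientation-specific min/max range loops by a single unified direction-vector walk (step signs sx,sy) that marks each segment cell by cell from its first endpoint to its last. Pre_ additionally excludes paths containing a non-axis-aligned (diagonal) segment: there A's else-branch happens to mark a horizontal line at y1, an artefact of its two-branch structure, and B raises ValueError.
import Mathlib
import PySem

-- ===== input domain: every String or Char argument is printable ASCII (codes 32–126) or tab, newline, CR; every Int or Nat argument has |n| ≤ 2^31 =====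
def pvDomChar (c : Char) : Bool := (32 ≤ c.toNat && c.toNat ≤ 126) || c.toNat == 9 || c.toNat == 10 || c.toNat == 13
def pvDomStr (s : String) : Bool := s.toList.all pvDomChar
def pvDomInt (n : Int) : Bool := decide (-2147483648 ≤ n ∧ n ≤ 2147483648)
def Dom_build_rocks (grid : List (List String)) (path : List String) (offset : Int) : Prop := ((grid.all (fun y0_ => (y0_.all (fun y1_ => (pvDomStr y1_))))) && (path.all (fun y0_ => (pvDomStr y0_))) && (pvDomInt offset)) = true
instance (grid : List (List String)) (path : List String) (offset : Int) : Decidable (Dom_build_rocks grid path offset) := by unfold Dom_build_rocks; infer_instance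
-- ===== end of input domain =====

-- B parses the corner points once and marks every segment with one unified direction-vector
-- walk instead of A's two orientation-specific range loops (objective: alternative); both
-- Pythons mutate `grid` in place, the equivalence proved here is about the return value.

-- ===== PORT A =====
-- shared helper: Python's `map(int, s.split(","))` unpacked into exactly two ints
-- (none = ValueError, either from int() or from unpacking ≠ 2 pieces)
def parsePt (s : String) : Option (Int × Int) :=
  match PySem.Str.split? s "," with
  | some [a, b] =>
    match PySem.Int.ofStr? a, PySem.Int.ofStr? b with
    | some x, some y => some (x, y)
    | _, _ => none
  | _ => none

-- shared helper: Python's `grid[y][x] = "#"` — exact including negative-index wraparound;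
-- totalized as a no-op where Python raises IndexError (such inputs are outside Pre_)
def markCell (g : List (List String)) (y x : Int) : List (List String) :=
  match PySem.List.pyIdx? g.length y with
  | some iy => g.set iy (PySem.List.pySetD (g.getD iy []) x "#")
  | none => g

def build_rocks (grid : List (List String)) (path : List String) (offset : Int) : List (List String) :=
  (PySem.List.pyRange 0 ((path.length : Int) - 1) 1).foldl (fun g part =>
    match parsePt (PySem.List.pyGetD path part ""), parsePt (PySem.List.pyGetD path (part + 1) "") with
    | some p1, some p2 =>
      let x1 := p1.1 - offset
      let y1 := p1.2
      let x2 := p2.1 - offset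
      let y2 := p2.2
      if x1 = x2 then
        (PySem.List.pyRange (min y1 y2) (max y1 y2 + 1) 1).foldl (fun g i => markCell g i x1) g
      else
        (PySem.List.pyRange (min x1 x2) (max x1 x2 + 1) 1).foldl (fun g i => markCell g y1 i) g
    | _, _ => g) grid     -- a parse failure raises in Python; such inputs are outside Pre_

-- ===== PORT B =====
-- `pts = [tuple(map(int, p.split(","))) for p in path]` (none = the comprehension raises)
def parseAll : List String → Option (List (Int × Int))
  | [] => some []
  | s :: rest =>
    match parsePt s, parseAll rest with
    | some p, some ps => some (p :: ps)
    | _, _ => none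

-- `for _ in range(steps): grid[cy][cx] = "#"; cx += sx; cy += sy`
def markWalk : List (List String) → Int → Int → Int → Int → Nat → List (List String)
  | g, _, _, _, _, 0 => g
  | g, cx, cy, sx, sy, Nat.succ n => markWalk (markCell g cy cx) (cx + sx) (cy + sy) sx sy n

def build_rocks_alt (grid : List (List String)) (path : List String) (offset : Int) : List (List String) :=
  if path.length < 2 then grid
  else
    match parseAll path with
    | none => grid     -- the comprehension raises ValueError in Python; outside Pre_
    | some pts =>
      (pts.zip pts.tail).foldl (fun g pq =>
        let x1 := pq.1.1 - offset
        let y1 := pq.1.2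
        let x2 := pq.2.1 - offset
        let y2 := pq.2.2
        if x1 ≠ x2 ∧ y1 ≠ y2 then g     -- `raise ValueError` in Python; outside Pre_
        else
          let sx := (if x1 < x2 then (1 : Int) else 0) - (if x2 < x1 then 1 else 0)
          let sy := (if y1 < y2 then (1 : Int) else 0) - (if y2 < y1 then 1 else 0)
          markWalk g x1 y1 sx sy (max (x2 - x1).natAbs (y2 - y1).natAbs + 1)) grid

-- ===== PRECONDITION & SPEC =====
-- cell (row y, column x) can be assigned: both indexes in Python's range (wraparound included)
def cellOK (g : List (List String)) (y x : Int) : Prop :=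
  PySem.Raise.InRange g.length y ∧ PySem.Raise.InRange (PySem.List.pyGetD g y []).length x

-- one consecutive pair of corners: axis-aligned (A returns an accidental value on diagonal
-- segments, B raises) and every cell A assigns is in range (else A raises IndexError)
def SegOK (g : List (List String)) (offset : Int) (pq : (Int × Int) × (Int × Int)) : Prop :=
  (pq.1.1 - offset = pq.2.1 - offset ∨ pq.1.2 = pq.2.2) ∧
  (if pq.1.1 - offset = pq.2.1 - offset then
     ∀ i ∈ PySem.List.pyRange (min pq.1.2 pq.2.2) (max pq.1.2 pq.2.2 + 1) 1, cellOK g i (pq.1.1 - offset)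
   else
     ∀ i ∈ PySem.List.pyRange (min (pq.1.1 - offset) (pq.2.1 - offset)) (max (pq.1.1 - offset) (pq.2.1 - offset) + 1) 1, cellOK g pq.1.2 i)

-- the parsed value of one corner string (only meaningful when parsePt succeeds)
def ppt (s : String) : Int × Int := (parsePt s).getD (0, 0)

-- Pre_ excludes inputs where A raises (unparseable corners, out-of-range cells) and, beyond
-- that, paths containing a non-axis-aligned (diagonal) segment: there A returns an accidental
-- horizontal line at y1 (an artefact of its else-branch) while B raises ValueError.
def Pre_build_rocks (grid : List (List String)) (path : List String) (offset : Int) : Prop :=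
  path.length < 2 ∨
  ((∀ s ∈ path, (parsePt s).isSome = true) ∧
   ∀ pq ∈ path.zip path.tail, SegOK grid offset (ppt pq.1, ppt pq.2))
instance (grid : List (List String)) (path : List String) (offset : Int) : Decidable (Pre_build_rocks grid path offset) := by unfold Pre_build_rocks SegOK cellOK; infer_instance

def pvWitness_build_rocks : List (List String) × List String × Int :=
  ([[".", ".", "."], [".", ".", "."], [".", ".", "."]], ["2,0", "2,2", "0,2"], 1)

def Spec_build_rocks (grid : List (List String)) (path : List String) (offset : Int) (out : List (List String)) : Prop := out = build_rocks_alt grid path offset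
instance (grid : List (List String)) (path : List String) (offset : Int) (out : List (List String)) : Decidable (Spec_build_rocks grid path offset out) := by unfold Spec_build_rocks; infer_instance

-- ===== CLAIM (what is proved, stated in full; the proofs are below) =====
def Claim_equal_build_rocks : Prop := ∀ (grid : List (List String)) (path : List String) (offset : Int), Dom_build_rocks grid path offset → Pre_build_rocks grid path offset → Spec_build_rocks grid path offset (build_rocks grid path offset)

-- ===== LEMMAS AND PROOFS =====

-- marking, seen as a function of one cell (row, column)
def mcell (g : List (List String)) (c : Int × Int) : List (List String) := markCell g c.1 c.2

-- A's per-segment body, on parsed points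
def stepPt (offset : Int) (g : List (List String)) (p1 p2 : Int × Int) : List (List String) :=
  let x1 := p1.1 - offset
  let y1 := p1.2
  let x2 := p2.1 - offset
  let y2 := p2.2
  if x1 = x2 then
    (PySem.List.pyRange (min y1 y2) (max y1 y2 + 1) 1).foldl (fun g i => markCell g i x1) g
  else
    (PySem.List.pyRange (min x1 x2) (max x1 x2 + 1) 1).foldl (fun g i => markCell g y1 i) g

-- B's per-segment body, on parsed points
def stepW (offset : Int) (g : List (List String)) (p1 p2 : Int × Int) : List (List String) :=
  let x1 := p1.1 - offset
  let y1 := p1.2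
  let x2 := p2.1 - offset
  let y2 := p2.2
  if x1 ≠ x2 ∧ y1 ≠ y2 then g
  else
    let sx := (if x1 < x2 then (1 : Int) else 0) - (if x2 < x1 then 1 else 0)
    let sy := (if y1 < y2 then (1 : Int) else 0) - (if y2 < y1 then 1 else 0)
    markWalk g x1 y1 sx sy (max (x2 - x1).natAbs (y2 - y1).natAbs + 1)

lemma pyIdx?_some_lt {n : Nat} {i : Int} {k : Nat} (h : PySem.List.pyIdx? n i = some k) : k < n := by
  unfold PySem.List.pyIdx? at h; split_ifs at h <;> simp_all <;> omega

lemma rowset_none {r : List String} {z : Int} (v : String) (h : PySem.List.pyIdx? r.length z = none) :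
    PySem.List.pySetD r z v = r := by
  simp [PySem.List.pySetD, PySem.List.pySet?, h]

lemma rowset_some {r : List String} {z : Int} {j : Nat} (v : String) (h : PySem.List.pyIdx? r.length z = some j) :
    PySem.List.pySetD r z v = r.set j v := by
  simp [PySem.List.pySetD, PySem.List.pySet?, h]

lemma rowset_comm (r : List String) (x x' : Int) (v : String) :
    PySem.List.pySetD (PySem.List.pySetD r x v) x' v = PySem.List.pySetD (PySem.List.pySetD r x' v) x v := by
  cases h1 : PySem.List.pyIdx? r.length x with
  | none =>
    have hn : PySem.List.pyIdx? (PySem.List.pySetD r x' v).length x = none := by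
      rw [PySem.List.length_pySetD]; exact h1
    rw [rowset_none v h1, rowset_none v hn]
  | some j =>
    cases h2 : PySem.List.pyIdx? r.length x' with
    | none =>
      have hn : PySem.List.pyIdx? (PySem.List.pySetD r x v).length x' = none := by
        rw [PySem.List.length_pySetD]; exact h2
      rw [rowset_none v h2, rowset_none v hn]
    | some j' =>
      rw [rowset_some v h1, rowset_some v h2,
          rowset_some v (show PySem.List.pyIdx? (r.set j v).length x' = some j' by simpa using h2),
          rowset_some v (show PySem.List.pyIdx? (r.set j' v).length x = some j by simpa using h1)]
      by_cases hjj : j = j'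
      · subst hjj; simp [List.set_set]
      · rw [List.set_comm _ _ hjj]

lemma markCell_none {g : List (List String)} {y : Int} (x : Int) (h : PySem.List.pyIdx? g.length y = none) :
    markCell g y x = g := by
  simp [markCell, h]

lemma markCell_some {g : List (List String)} {y : Int} {iy : Nat} (x : Int) (h : PySem.List.pyIdx? g.length y = some iy) :
    markCell g y x = g.set iy (PySem.List.pySetD (g.getD iy []) x "#") := by
  simp [markCell, h]

lemma markCell_comm (g : List (List String)) (y x y' x' : Int) :
    markCell (markCell g y x) y' x' = markCell (markCell g y' x') y x := by
  cases hy : PySem.List.pyIdx? g.length y with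
  | none =>
    cases hy' : PySem.List.pyIdx? g.length y' with
    | none => rw [markCell_none x' hy', markCell_none x hy, markCell_none x' hy']
    | some iy' =>
      rw [markCell_none x hy, markCell_some x' hy',
          markCell_none x (show PySem.List.pyIdx? (g.set iy' (PySem.List.pySetD (g.getD iy' []) x' "#")).length y = none by simpa using hy)]
  | some iy =>
    cases hy' : PySem.List.pyIdx? g.length y' with
    | none =>
      rw [markCell_none x' hy', markCell_some x hy,
          markCell_none x' (show PySem.List.pyIdx? (g.set iy (PySem.List.pySetD (g.getD iy []) x "#")).length y' = none by simpa using hy')]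
    | some iy' =>
      have hiy : iy < g.length := pyIdx?_some_lt hy
      have hiy' : iy' < g.length := pyIdx?_some_lt hy'
      rw [markCell_some x hy, markCell_some x' hy']
      rw [markCell_some x' (show PySem.List.pyIdx? ((g.set iy (PySem.List.pySetD (g.getD iy []) x "#")).length) y' = some iy' by simpa using hy')]
      rw [markCell_some x (show PySem.List.pyIdx? ((g.set iy' (PySem.List.pySetD (g.getD iy' []) x' "#")).length) y = some iy by simpa using hy)]
      by_cases hii : iy = iy'
      · subst hii
        have e1 : ((g.set iy (PySem.List.pySetD (g.getD iy []) x "#")).getD iy []) = PySem.List.pySetD (g.getD iy []) x "#" := by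
          simp [List.getD, hiy]
        have e2 : ((g.set iy (PySem.List.pySetD (g.getD iy []) x' "#")).getD iy []) = PySem.List.pySetD (g.getD iy []) x' "#" := by
          simp [List.getD, hiy]
        rw [e1, e2, List.set_set, List.set_set, rowset_comm]
      · have e1 : ((g.set iy (PySem.List.pySetD (g.getD iy []) x "#")).getD iy' []) = g.getD iy' [] := by
          simp [List.getD, List.getElem?_set_ne hii]
        have e2 : ((g.set iy' (PySem.List.pySetD (g.getD iy' []) x' "#")).getD iy []) = g.getD iy [] := by
          simp [List.getD, List.getElem?_set_ne (Ne.symm hii)]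
        rw [e1, e2, List.set_comm _ _ hii]

lemma foldl_mcell_push (l : List (Int × Int)) : ∀ (g : List (List String)) (c : Int × Int),
    mcell (l.foldl mcell g) c = l.foldl mcell (mcell g c) := by
  intro g c
  induction l generalizing g with
  | nil => rfl
  | cons a t ih =>
    simp only [List.foldl_cons]
    rw [ih (mcell g a)]
    have h : mcell (mcell g a) c = mcell (mcell g c) a := markCell_comm g a.1 a.2 c.1 c.2
    rw [h]

lemma foldl_mcell_reverse (l : List (Int × Int)) : ∀ (g : List (List String)),
    l.reverse.foldl mcell g = l.foldl mcell g := by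
  intro g
  induction l generalizing g with
  | nil => rfl
  | cons a t ih =>
    simp only [List.reverse_cons, List.foldl_append, List.foldl_cons, List.foldl_nil]
    rw [ih g, foldl_mcell_push t g a]

-- the list of cells B's walk visits
def walkCells : Int → Int → Int → Int → Nat → List (Int × Int)
  | _, _, _, _, 0 => []
  | cx, cy, sx, sy, Nat.succ n => (cy, cx) :: walkCells (cx + sx) (cy + sy) sx sy n

lemma markWalk_eq_cells (sx sy : Int) : ∀ (n : Nat) (g : List (List String)) (cx cy : Int),
    markWalk g cx cy sx sy n = (walkCells cx cy sx sy n).foldl mcell g := by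
  intro n
  induction n with
  | zero => intro g cx cy; rfl
  | succ n ih =>
    intro g cx cy
    show markWalk (markCell g cy cx) (cx + sx) (cy + sy) sx sy n = _
    rw [ih]
    rfl

lemma walkCells_asc_y (cx : Int) : ∀ (n : Nat) (cy : Int),
    walkCells cx cy 0 1 n = (PySem.List.pyRange cy (cy + n) 1).map (fun i => (i, cx)) := by
  intro n
  induction n with
  | zero => intro cy; simp [walkCells, PySem.List.pyRange_one_eq_nil]
  | succ n ih =>
    intro cy
    show (cy, cx) :: walkCells (cx + 0) (cy + 1) 0 1 n = _
    rw [show cx + 0 = cx from by ring, ih (cy + 1)]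
    conv_rhs =>
      rw [show (cy + ((n + 1 : Nat) : Int)) = cy + ((n : Int) + 1) from by push_cast; ring,
          PySem.List.pyRange_one_cons (show (cy : Int) < cy + ((n : Int) + 1) from by omega),
          List.map_cons]
    rw [show cy + ((n : Int) + 1) = (cy + 1) + (n : Int) from by ring]

lemma walkCells_desc_y (cx : Int) : ∀ (n : Nat) (cy : Int),
    walkCells cx cy 0 (-1) n = ((PySem.List.pyRange (cy - n + 1) (cy + 1) 1).map (fun i => (i, cx))).reverse := by
  intro n
  induction n with
  | zero => intro cy; simp [walkCells, PySem.List.pyRange_one_eq_nil]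
  | succ n ih =>
    intro cy
    show (cy, cx) :: walkCells (cx + 0) (cy + -1) 0 (-1) n = _
    rw [show cx + 0 = cx from by ring, ih (cy + -1)]
    rw [show (cy + -1) - (n : Int) + 1 = cy - n from by ring,
        show (cy + -1) + 1 = cy from by ring,
        show (((n + 1 : Nat)) : Int) = (n : Int) + 1 from by push_cast; ring,
        show cy - ((n : Int) + 1) + 1 = cy - n from by ring]
    rw [PySem.List.pyRange_one_succ_right (by omega)]
    simp [List.map_append, List.reverse_append]

lemma walkCells_asc_x (cy : Int) : ∀ (n : Nat) (cx : Int),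
    walkCells cx cy 1 0 n = (PySem.List.pyRange cx (cx + n) 1).map (fun i => (cy, i)) := by
  intro n
  induction n with
  | zero => intro cx; simp [walkCells, PySem.List.pyRange_one_eq_nil]
  | succ n ih =>
    intro cx
    show (cy, cx) :: walkCells (cx + 1) (cy + 0) 1 0 n = _
    rw [show cy + 0 = cy from by ring, ih (cx + 1)]
    conv_rhs =>
      rw [show (cx + ((n + 1 : Nat) : Int)) = cx + ((n : Int) + 1) from by push_cast; ring,
          PySem.List.pyRange_one_cons (show (cx : Int) < cx + ((n : Int) + 1) from by omega),
          List.map_cons]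
    rw [show cx + ((n : Int) + 1) = (cx + 1) + (n : Int) from by ring]

lemma walkCells_desc_x (cy : Int) : ∀ (n : Nat) (cx : Int),
    walkCells cx cy (-1) 0 n = ((PySem.List.pyRange (cx - n + 1) (cx + 1) 1).map (fun i => (cy, i))).reverse := by
  intro n
  induction n with
  | zero => intro cx; simp [walkCells, PySem.List.pyRange_one_eq_nil]
  | succ n ih =>
    intro cx
    show (cy, cx) :: walkCells (cx + -1) (cy + 0) (-1) 0 n = _
    rw [show cy + 0 = cy from by ring, ih (cx + -1)]
    rw [show (cx + -1) - (n : Int) + 1 = cx - n from by ring,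
        show (cx + -1) + 1 = cx from by ring,
        show (((n + 1 : Nat)) : Int) = (n : Int) + 1 from by push_cast; ring,
        show cx - ((n : Int) + 1) + 1 = cx - n from by ring]
    rw [PySem.List.pyRange_one_succ_right (by omega)]
    simp [List.map_append, List.reverse_append]

lemma seg_eq (offset : Int) (p1 p2 : Int × Int)
    (hal : p1.1 - offset = p2.1 - offset ∨ p1.2 = p2.2) (g : List (List String)) :
    stepPt offset g p1 p2 = stepW offset g p1 p2 := by
  obtain ⟨x1, y1⟩ := p1
  obtain ⟨x2, y2⟩ := p2
  simp only [stepPt, stepW]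
  by_cases hx : x1 - offset = x2 - offset
  · rw [if_pos hx, if_neg (show ¬(x1 - offset ≠ x2 - offset ∧ y1 ≠ y2) from fun h => h.1 hx)]
    rw [show ((if x1 - offset < x2 - offset then (1 : Int) else 0) - (if x2 - offset < x1 - offset then 1 else 0)) = 0 from by
      rw [if_neg (by omega), if_neg (by omega)]; ring]
    rw [show (x2 - offset - (x1 - offset)).natAbs = 0 from by omega]
    rw [show max 0 (y2 - y1).natAbs = (y2 - y1).natAbs from Nat.zero_max _]
    rcases lt_trichotomy y1 y2 with h | h | h
    · rw [show ((if y1 < y2 then (1 : Int) else 0) - (if y2 < y1 then 1 else 0)) = 1 from by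
        rw [if_pos h, if_neg (by omega)]; ring]
      rw [markWalk_eq_cells, walkCells_asc_y]
      rw [show y1 + (((y2 - y1).natAbs + 1 : Nat) : Int) = y2 + 1 from by omega]
      rw [min_eq_left (le_of_lt h), max_eq_right (le_of_lt h)]
      simp [List.foldl_map, mcell]
    · subst h
      rw [show ((if y1 < y1 then (1 : Int) else 0) - (if y1 < y1 then 1 else 0)) = 0 from by
        rw [if_neg (lt_irrefl y1)]; ring]
      rw [show (y1 - y1).natAbs = 0 from by omega]
      simp [min_self, max_self, PySem.List.pyRange_one_singleton, markWalk]
    · rw [show ((if y1 < y2 then (1 : Int) else 0) - (if y2 < y1 then 1 else 0)) = -1 from by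
        rw [if_neg (by omega), if_pos h]; ring]
      rw [markWalk_eq_cells, walkCells_desc_y]
      rw [show y1 - (((y2 - y1).natAbs + 1 : Nat) : Int) + 1 = y2 from by omega]
      rw [foldl_mcell_reverse]
      rw [min_eq_right (le_of_lt h), max_eq_left (le_of_lt h)]
      simp [List.foldl_map, mcell]
  · have hy : y1 = y2 := hal.resolve_left hx
    rw [if_neg hx, if_neg (show ¬(x1 - offset ≠ x2 - offset ∧ y1 ≠ y2) from fun h => h.2 hy)]
    rw [show ((if y1 < y2 then (1 : Int) else 0) - (if y2 < y1 then 1 else 0)) = 0 from by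
      subst hy; rw [if_neg (lt_irrefl y1)]; ring]
    rw [show (y2 - y1).natAbs = 0 from by omega]
    rw [show max (x2 - offset - (x1 - offset)).natAbs 0 = (x2 - offset - (x1 - offset)).natAbs from Nat.max_zero _]
    rcases lt_or_gt_of_ne hx with h | h
    · rw [show ((if x1 - offset < x2 - offset then (1 : Int) else 0) - (if x2 - offset < x1 - offset then 1 else 0)) = 1 from by
        rw [if_pos h, if_neg (by omega)]; ring]
      rw [markWalk_eq_cells, walkCells_asc_x]
      rw [show (x1 - offset) + (((x2 - offset - (x1 - offset)).natAbs + 1 : Nat) : Int) = (x2 - offset) + 1 from by omega]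
      rw [min_eq_left (le_of_lt h), max_eq_right (le_of_lt h)]
      simp [List.foldl_map, mcell]
    · rw [show ((if x1 - offset < x2 - offset then (1 : Int) else 0) - (if x2 - offset < x1 - offset then 1 else 0)) = -1 from by
        rw [if_neg (by omega), if_pos h]; ring]
      rw [markWalk_eq_cells, walkCells_desc_x]
      rw [show (x1 - offset) - (((x2 - offset - (x1 - offset)).natAbs + 1 : Nat) : Int) + 1 = x2 - offset from by omega]
      rw [foldl_mcell_reverse]
      rw [min_eq_right (le_of_lt h), max_eq_left (le_of_lt h)]
      simp [List.foldl_map, mcell]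

lemma idx_fold_nat {β : Type} (F : β → String → String → β) : ∀ (p : List String) (g : β),
    (List.range (p.length - 1)).foldl (fun g k => F g (p.getD k "") (p.getD (k + 1) "")) g
      = (p.zip p.tail).foldl (fun g pq => F g pq.1 pq.2) g := by
  intro p
  induction p with
  | nil => intro g; rfl
  | cons s rest ih =>
    intro g
    cases rest with
    | nil => rfl
    | cons t r =>
      have hlen : (s :: t :: r).length - 1 = r.length + 1 := by simp
      rw [hlen, List.range_succ_eq_map, List.foldl_cons, List.foldl_map]
      have h0 : (s :: t :: r).getD 0 "" = s := rfl
      have h1 : (s :: t :: r).getD (0 + 1) "" = t := rfl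
      rw [h0, h1]
      have hfun : ∀ (acc : β) (k : Nat), k ∈ List.range r.length →
          F acc ((s :: t :: r).getD k.succ "") ((s :: t :: r).getD (k.succ + 1) "") =
          F acc ((t :: r).getD k "") ((t :: r).getD (k + 1) "") := by
        intro acc k _
        rfl
      rw [PySem.List.foldl_congr_mem _ _ _ _ hfun]
      have := ih (F g s t)
      have hlen2 : (t :: r).length - 1 = r.length := by simp
      rw [hlen2] at this
      rw [this]
      rfl

lemma idx_fold {β : Type} (F : β → String → String → β) (p : List String) (g : β) :
    (PySem.List.pyRange 0 ((p.length : Int) - 1) 1).foldl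
        (fun g part => F g (PySem.List.pyGetD p part "") (PySem.List.pyGetD p (part + 1) "")) g
      = (p.zip p.tail).foldl (fun g pq => F g pq.1 pq.2) g := by
  rw [PySem.List.pyRange_one]
  rw [show ((p.length : Int) - 1 - 0).toNat = p.length - 1 from by omega]
  rw [List.foldl_map]
  have hfun : ∀ (acc : β) (k : Nat), k ∈ List.range (p.length - 1) →
      F acc (PySem.List.pyGetD p (0 + (k : Int)) "") (PySem.List.pyGetD p ((0 + (k : Int)) + 1) "") =
      F acc (p.getD k "") (p.getD (k + 1) "") := by
    intro acc k _
    rw [show (0 + (k : Int)) = (k : Int) from by ring,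
        show ((k : Int) + 1) = ((k + 1 : Nat) : Int) from by push_cast; ring]
    rw [PySem.List.pyGetD_natCast, PySem.List.pyGetD_natCast]
  rw [PySem.List.foldl_congr_mem _ _ _ _ hfun]
  exact idx_fold_nat F p g

lemma zip_parsed {β : Type} (G : β → (Int × Int) → (Int × Int) → β) :
    ∀ (p : List String) (pts : List (Int × Int)), parseAll p = some pts → ∀ (g : β),
    (p.zip p.tail).foldl
        (fun g pq => match parsePt pq.1, parsePt pq.2 with
                     | some a, some b => G g a b
                     | _, _ => g) g
      = (pts.zip pts.tail).foldl (fun g pq => G g pq.1 pq.2) g := by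
  intro p
  induction p with
  | nil =>
    intro pts hp g
    cases hp
    rfl
  | cons st rest ih =>
    intro pts hp g
    cases ha : parsePt st with
    | none => simp [parseAll, ha] at hp
    | some a =>
      cases hr : parseAll rest with
      | none => simp [parseAll, ha, hr] at hp
      | some ps =>
        have hpts : a :: ps = pts := by simp [parseAll, ha, hr] at hp; exact hp
        subst hpts
        cases rest with
        | nil => cases hr; rfl
        | cons t r =>
          obtain ⟨b, qs, hb, hq⟩ : ∃ b qs, parsePt t = some b ∧ ps = b :: qs := by
            cases hb : parsePt t with
            | none => simp [parseAll, hb] at hr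
            | some b =>
              cases hq : parseAll r with
              | none => simp [parseAll, hb, hq] at hr
              | some qs =>
                refine ⟨b, qs, rfl, ?_⟩
                simp [parseAll, hb, hq] at hr
                exact hr.symm
          subst hq
          show List.foldl _ _ ((st, t) :: (t :: r).zip r) = List.foldl _ _ ((a, b) :: (b :: qs).zip qs)
          rw [List.foldl_cons, List.foldl_cons]
          simp only [ha, hb]
          exact ih (b :: qs) hr (G g a b)

lemma parseAll_eq_map : ∀ (p : List String), (∀ s ∈ p, (parsePt s).isSome = true) →
    parseAll p = some (p.map ppt) := by
  intro p
  induction p with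
  | nil => intro _; rfl
  | cons s r ih =>
    intro h
    obtain ⟨a, ha⟩ := Option.isSome_iff_exists.mp (h s (List.mem_cons_self))
    simp [parseAll, ha, ih (fun t ht => h t (List.mem_cons_of_mem _ ht)), ppt]

lemma zip_tail_map {α β : Type} (f : α → β) (p : List α) :
    (p.map f).zip (p.map f).tail = (p.zip p.tail).map (fun pq => (f pq.1, f pq.2)) := by
  cases p with
  | nil => rfl
  | cons s r =>
    simp only [List.map_cons, List.tail_cons]
    rw [show (f s :: r.map f) = (s :: r).map f from rfl, List.zip_map]
    simp [Prod.map]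

-- ===== VERDICT (by name: the statement is the Claim_ definition above) =====
theorem build_rocks_spec : Claim_equal_build_rocks := by
  intro grid path offset _hdom hpre
  unfold Spec_build_rocks
  by_cases hlen : path.length < 2
  · have hA : build_rocks grid path offset = grid := by
      unfold build_rocks
      rw [PySem.List.pyRange_one_eq_nil (by omega : ((path.length : Int) - 1) ≤ 0)]
      rfl
    have hB : build_rocks_alt grid path offset = grid := by
      unfold build_rocks_alt
      rw [if_pos hlen]
    rw [hA, hB]
  · rcases hpre with h | ⟨hsome, hseg⟩
    · exact absurd h hlen
    · have hparse : parseAll path = some (path.map ppt) := parseAll_eq_map path hsome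
      set pts := path.map ppt with hpts
      have hseg' : ∀ pq ∈ pts.zip pts.tail, SegOK grid offset pq := by
        intro pq hmem
        rw [hpts, zip_tail_map] at hmem
        obtain ⟨pq0, hpq0, rfl⟩ := List.mem_map.mp hmem
        exact hseg pq0 hpq0
      have hB : build_rocks_alt grid path offset
          = (pts.zip pts.tail).foldl (fun g pq => stepW offset g pq.1 pq.2) grid := by
        unfold build_rocks_alt
        rw [if_neg hlen]
        simp only [hparse]
        rfl
      have hA1 : build_rocks grid path offset
          = (path.zip path.tail).foldl
              (fun g pq => match parsePt pq.1, parsePt pq.2 with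
                           | some p1, some p2 => stepPt offset g p1 p2
                           | _, _ => g) grid := by
        unfold build_rocks
        exact idx_fold (fun g s t => match parsePt s, parsePt t with
                                     | some p1, some p2 => stepPt offset g p1 p2
                                     | _, _ => g) path grid
      have hA2 := zip_parsed (fun g a b => stepPt offset g a b) path pts hparse grid
      rw [hA1, hA2, hB]
      apply PySem.List.foldl_congr_mem
      intro acc pq hmem
      exact seg_eq offset pq.1 pq.2 (hseg' pq hmem).1 acc
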